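-- pv_equiv track=rewrite | github.com/FoodXDevelopment/FoodBlock | sdk/python/foodblock/merge.py | _trim_to_ancestor
-- ===== SOURCE A (Python) =====
-- def _trim_to_ancestor(chain_blocks, ancestor_hash):
--     """Trim a chain to include blocks up to and including the ancestor."""
--     if ancestor_hash is None:
--         return list(chain_blocks)
--
--     trimmed = []
--     for block in chain_blocks:
--         trimmed.append(block)
--         if block['hash'] == ancestor_hash:
--             break
--     return trimmed
-- ===== SOURCE B (Python) =====
-- def _trim_to_ancestor(chain_blocks, ancestor_hash):
--     """Trim a chain to include blocks up to and including the ancestor."""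
--     blocks = list(chain_blocks)
--     if ancestor_hash is None:
--         return blocks
--     idx = next((i for i, b in enumerate(blocks) if b['hash'] == ancestor_hash), None)
--     return blocks if idx is None else blocks[:idx + 1]
-- ===== Notes on version B (the rewrite author's own statement) =====
-- stated objective: idiomatic
-- what changed: Replaces the append-and-break accumulation loop with a find-first-index search followed by a single slice, separating the search from the prefix construction.
import Mathlib
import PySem

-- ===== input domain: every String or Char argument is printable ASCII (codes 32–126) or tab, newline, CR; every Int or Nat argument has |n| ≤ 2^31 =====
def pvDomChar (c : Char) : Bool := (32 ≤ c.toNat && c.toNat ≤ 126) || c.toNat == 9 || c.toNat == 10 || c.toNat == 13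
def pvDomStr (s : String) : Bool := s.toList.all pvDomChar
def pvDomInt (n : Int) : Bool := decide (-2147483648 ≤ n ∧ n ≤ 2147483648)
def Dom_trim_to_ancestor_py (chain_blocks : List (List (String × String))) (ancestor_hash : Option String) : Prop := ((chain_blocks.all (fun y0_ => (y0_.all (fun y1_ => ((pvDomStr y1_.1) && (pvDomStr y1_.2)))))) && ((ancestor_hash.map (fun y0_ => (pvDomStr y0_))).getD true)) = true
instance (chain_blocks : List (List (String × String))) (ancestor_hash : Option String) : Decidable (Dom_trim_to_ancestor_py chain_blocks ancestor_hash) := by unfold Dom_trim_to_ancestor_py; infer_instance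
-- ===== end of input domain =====

-- B separates the search for the ancestor (find-first-index) from building the prefix (slice); same behaviour, idiomatic decomposition.

-- ===== PORT A =====
-- the for-loop with append+break: emit each block, stop after the first whose "hash" equals a
def trimLoopA (a : String) : List (List (String × String)) → List (List (String × String))
  | [] => []
  | b :: rest =>
      if (PySem.Dict.mk b).get? "hash" == some a then [b]
      else b :: trimLoopA a rest

def trim_to_ancestor_py (chain_blocks : List (List (String × String))) (ancestor_hash : Option String) : List (List (String × String)) :=
  match ancestor_hash with
  | none => chain_blocks
  | some a => trimLoopA a chain_blocks

-- ===== PORT B =====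
def trim_to_ancestor_py_alt (chain_blocks : List (List (String × String))) (ancestor_hash : Option String) : List (List (String × String)) :=
  match ancestor_hash with
  | none => chain_blocks
  | some a =>
      match chain_blocks.findIdx? (fun b => (PySem.Dict.mk b).get? "hash" == some a) with
      | none => chain_blocks
      | some i => chain_blocks.take (i + 1)

-- ===== PRECONDITION & SPEC =====
-- Pre_ excludes exactly the inputs where Python raises KeyError: a block lacking the "hash" key
-- encountered before (or instead of) the first block whose "hash" equals ancestor_hash.
def Pre_trim_to_ancestor_py (chain_blocks : List (List (String × String))) (ancestor_hash : Option String) : Prop :=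
  match ancestor_hash with
  | none => True
  | some a =>
      ((chain_blocks.takeWhile (fun b => !((PySem.Dict.mk b).get? "hash" == some a))).all
        (fun b => ((PySem.Dict.mk b).get? "hash").isSome)) = true
instance (chain_blocks : List (List (String × String))) (ancestor_hash : Option String) : Decidable (Pre_trim_to_ancestor_py chain_blocks ancestor_hash) := by unfold Pre_trim_to_ancestor_py; cases ancestor_hash <;> infer_instance

def pvWitness_trim_to_ancestor_py : (List (List (String × String))) × Option String :=
  ([[("hash", "h1")], [("hash", "h2")], [("hash", "h3")]], some "h2")

def Spec_trim_to_ancestor_py (chain_blocks : List (List (String × String))) (ancestor_hash : Option String) (out : List (List (String × String))) : Prop := out = trim_to_ancestor_py_alt chain_blocks ancestor_hash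
instance (chain_blocks : List (List (String × String))) (ancestor_hash : Option String) (out : List (List (String × String))) : Decidable (Spec_trim_to_ancestor_py chain_blocks ancestor_hash out) := by unfold Spec_trim_to_ancestor_py; infer_instance

-- ===== CLAIM (what is proved, stated in full; the proofs are below) =====
def Claim_equal_trim_to_ancestor_py : Prop := ∀ (chain_blocks : List (List (String × String))) (ancestor_hash : Option String), Dom_trim_to_ancestor_py chain_blocks ancestor_hash → Pre_trim_to_ancestor_py chain_blocks ancestor_hash → Spec_trim_to_ancestor_py chain_blocks ancestor_hash (trim_to_ancestor_py chain_blocks ancestor_hash)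

-- ===== LEMMAS AND PROOFS =====
theorem trimLoopA_eq_findIdx (a : String) (bs : List (List (String × String))) :
    trimLoopA a bs =
      match bs.findIdx? (fun b => (PySem.Dict.mk b).get? "hash" == some a) with
      | none => bs
      | some i => bs.take (i + 1) := by
  induction bs with
  | nil => simp [trimLoopA]
  | cons b rest ih =>
      by_cases h : ((PySem.Dict.mk b).get? "hash" == some a) = true
      · simp [trimLoopA, h, List.findIdx?_cons]
      · simp only [Bool.not_eq_true] at h
        simp [trimLoopA, h, List.findIdx?_cons, ih]
        cases rest.findIdx? (fun b => (PySem.Dict.mk b).get? "hash" == some a) <;> simp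

-- ===== VERDICT (by name: the statement is the Claim_ definition above) =====
theorem trim_to_ancestor_py_spec : Claim_equal_trim_to_ancestor_py := by
  intro chain_blocks ancestor_hash _ _
  unfold Spec_trim_to_ancestor_py trim_to_ancestor_py trim_to_ancestor_py_alt
  cases ancestor_hash with
  | none => rfl
  | some a => exact trimLoopA_eq_findIdx a chain_blocks
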